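-- pv_equiv track=rewrite | github.com/haasii-s/chord-name | server/Music/filters.py | repeated_interval_filter
-- ===== SOURCE A (Python) =====
-- def repeated_interval_filter(semitone_list):
--
--     octave_down_comparison_list = []
--     for i in semitone_list:
--         octave_shifted_down = i - 12
--         octave_down_comparison_list.append(octave_shifted_down)
--
--     for i in octave_down_comparison_list:
--         if i in semitone_list:
--             return True
--
--         else:
--             pass
--
--     return False
-- ===== SOURCE B (Python) =====
-- def repeated_interval_filter(semitone_list):
--     seen = set()
--     for x in semitone_list:
--         if x - 12 in seen or x + 12 in seen:
--             return True
--         seen.add(x)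
--     return False
-- ===== Notes on version B (the rewrite author's own statement) =====
-- stated objective: faster
-- what changed: Single pass with an incrementally built hash set checking both x-12 and x+12 against previously seen notes, replacing A's build-a-shifted-list-then-rescan quadratic membership scan.
import Mathlib
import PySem

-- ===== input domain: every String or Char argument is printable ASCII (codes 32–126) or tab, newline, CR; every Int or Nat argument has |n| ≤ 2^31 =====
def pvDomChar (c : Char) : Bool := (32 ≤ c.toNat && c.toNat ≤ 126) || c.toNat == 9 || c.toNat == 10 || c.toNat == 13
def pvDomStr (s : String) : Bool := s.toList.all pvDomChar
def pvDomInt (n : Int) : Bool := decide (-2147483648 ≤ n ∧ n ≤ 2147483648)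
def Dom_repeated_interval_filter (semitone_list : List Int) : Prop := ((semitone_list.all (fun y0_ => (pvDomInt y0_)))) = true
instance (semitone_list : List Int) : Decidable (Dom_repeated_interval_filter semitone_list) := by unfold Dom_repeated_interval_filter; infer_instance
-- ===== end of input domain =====

-- B replaces A's shifted-list build plus quadratic membership rescan with one pass over the
-- list keeping a set of already-seen notes and testing x-12 / x+12 against it (objective: faster).

-- ===== PORT A =====
-- second loop of A: return True on the first shifted value found in semitone_list
def riFilterLoop (semitone_list : List Int) : List Int → Bool
  | [] => false
  | i :: rest => if semitone_list.contains i then true else riFilterLoop semitone_list rest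

def repeated_interval_filter (semitone_list : List Int) : Bool :=
  let octave_down_comparison_list :=
    semitone_list.foldl (fun acc i => acc ++ [i - 12]) []
  riFilterLoop semitone_list octave_down_comparison_list

-- ===== PORT B =====
-- B's loop: seen holds the notes already scanned; stop at the first octave partner
def riAltLoop (seen : PySem.Set Int) : List Int → Bool
  | [] => false
  | x :: rest =>
    if PySem.Set.contains seen (x - 12) || PySem.Set.contains seen (x + 12) then true
    else riAltLoop (PySem.Set.add seen x) rest

def repeated_interval_filter_alt (semitone_list : List Int) : Bool :=
  riAltLoop PySem.Set.empty semitone_list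

-- ===== PRECONDITION & SPEC =====
def Spec_repeated_interval_filter (semitone_list : List Int) (out : Bool) : Prop := out = repeated_interval_filter_alt semitone_list
instance (semitone_list : List Int) (out : Bool) : Decidable (Spec_repeated_interval_filter semitone_list out) := by unfold Spec_repeated_interval_filter; infer_instance

-- ===== CLAIM (what is proved, stated in full; the proofs are below) =====
def Claim_equal_repeated_interval_filter : Prop := ∀ (semitone_list : List Int), Dom_repeated_interval_filter semitone_list → Spec_repeated_interval_filter semitone_list (repeated_interval_filter semitone_list)

-- ===== LEMMAS AND PROOFS =====

-- A's first loop builds the map (· - 12) of the list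
theorem riFoldl_shift (l : List Int) (acc : List Int) :
    l.foldl (fun acc i => acc ++ [i - 12]) acc = acc ++ l.map (fun i => i - 12) := by
  induction l generalizing acc with
  | nil => simp
  | cons x xs ih => simp [List.foldl_cons, ih]

-- A's second loop is an existence test
theorem riFilterLoop_iff (l : List Int) (c : List Int) :
    riFilterLoop l c = true ↔ ∃ i ∈ c, i ∈ l := by
  induction c with
  | nil => simp [riFilterLoop]
  | cons x xs ih =>
    by_cases h : x ∈ l
    · simp [riFilterLoop, h]
    · simp [riFilterLoop, h, ih]

-- characterisation of B's loop: a hit against the seen set, or an octave pair within the rest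
theorem riAltLoop_iff (rest : List Int) : ∀ (seen : PySem.Set Int),
    riAltLoop seen rest = true ↔
      ((∃ z ∈ rest, (z - 12) ∈ seen ∨ (z + 12) ∈ seen) ∨
       (∃ a ∈ rest, ∃ b ∈ rest, a - b = 12)) := by
  induction rest with
  | nil => intro seen; simp [riAltLoop]
  | cons x xs ih =>
    intro seen
    by_cases h : (x - 12) ∈ seen ∨ (x + 12) ∈ seen
    · have hc : (PySem.Set.contains seen (x - 12) || PySem.Set.contains seen (x + 12)) = true := by
        simp only [Bool.or_eq_true, PySem.Set.contains_iff]; exact h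
      simp only [riAltLoop, hc, if_pos]
      constructor
      · intro _; exact Or.inl ⟨x, List.mem_cons_self .., h⟩
      · intro _; trivial
    · have hc : (PySem.Set.contains seen (x - 12) || PySem.Set.contains seen (x + 12)) = false := by
        simp only [Bool.or_eq_false_iff]
        constructor <;> (rw [Bool.eq_false_iff]; intro hh)
        · exact h (Or.inl ((PySem.Set.contains_iff _ _).mp hh))
        · exact h (Or.inr ((PySem.Set.contains_iff _ _).mp hh))
      simp only [riAltLoop, hc, Bool.false_eq_true, if_false]
      rw [ih (PySem.Set.add seen x)]
      constructor
      · rintro (⟨z, hz, hmem⟩ | ⟨a, ha, b, hb, hab⟩)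
        · rcases hmem with hmem | hmem
          · rcases (PySem.Set.mem_add _ _ _).mp hmem with hs | hx
            · exact Or.inl ⟨z, List.mem_cons_of_mem _ hz, Or.inl hs⟩
            · -- z - 12 = x : pair (z, x)
              exact Or.inr ⟨z, List.mem_cons_of_mem _ hz, x, List.mem_cons_self .., by omega⟩
          · rcases (PySem.Set.mem_add _ _ _).mp hmem with hs | hx
            · exact Or.inl ⟨z, List.mem_cons_of_mem _ hz, Or.inr hs⟩
            · -- z + 12 = x : pair (x, z)
              exact Or.inr ⟨x, List.mem_cons_self .., z, List.mem_cons_of_mem _ hz, by omega⟩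
        · exact Or.inr ⟨a, List.mem_cons_of_mem _ ha, b, List.mem_cons_of_mem _ hb, hab⟩
      · rintro (⟨z, hz, hmem⟩ | ⟨a, ha, b, hb, hab⟩)
        · rcases List.mem_cons.mp hz with rfl | hz'
          · exact absurd hmem h
          · rcases hmem with hmem | hmem
            · exact Or.inl ⟨z, hz', Or.inl ((PySem.Set.mem_add _ _ _).mpr (Or.inl hmem))⟩
            · exact Or.inl ⟨z, hz', Or.inr ((PySem.Set.mem_add _ _ _).mpr (Or.inl hmem))⟩
        · rcases List.mem_cons.mp ha with rfl | ha' <;> rcases List.mem_cons.mp hb with hb0 | hb'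
          · exact absurd hab (by omega)
          · exact Or.inl ⟨b, hb', Or.inr ((PySem.Set.mem_add _ _ _).mpr (Or.inr (by omega)))⟩
          · exact Or.inl ⟨a, ha', Or.inl ((PySem.Set.mem_add _ _ _).mpr (Or.inr (by omega)))⟩
          · exact Or.inr ⟨a, ha', b, hb', hab⟩

-- ===== VERDICT (by name: the statement is the Claim_ definition above) =====
theorem repeated_interval_filter_spec : Claim_equal_repeated_interval_filter := by
  intro l _
  show repeated_interval_filter l = repeated_interval_filter_alt l
  have hA : repeated_interval_filter l = true ↔ ∃ x ∈ l, ∃ y ∈ l, x - y = 12 := by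
    unfold repeated_interval_filter
    rw [riFoldl_shift, List.nil_append, riFilterLoop_iff]
    constructor
    · rintro ⟨i, hi, hil⟩
      rcases List.mem_map.mp hi with ⟨x, hx, rfl⟩
      exact ⟨x, hx, x - 12, hil, by omega⟩
    · rintro ⟨x, hx, y, hy, hxy⟩
      exact ⟨x - 12, List.mem_map.mpr ⟨x, hx, rfl⟩, by rwa [show x - 12 = y by omega]⟩
  have hB : repeated_interval_filter_alt l = true ↔ ∃ x ∈ l, ∃ y ∈ l, x - y = 12 := by
    unfold repeated_interval_filter_alt
    rw [riAltLoop_iff]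
    simp [PySem.Set.empty]
  rw [Bool.eq_iff_iff, hA, hB]
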